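-- pv_equiv track=rewrite | github.com/eyereasoner/eye | brains/cases/square_sum_divisibility.py | first_k_solutions
-- ===== SOURCE A (Python) =====
-- from typing import List
--
-- def first_k_solutions(k: int = 20) -> List[int]:
--     ans = []
--     x = 1
--     while len(ans) < k:
--         if x % 6 in (1, 5):
--             ans.append(x)
--         x += 1
--     return ans
-- ===== SOURCE B (Python) =====
-- from typing import List
--
-- def first_k_solutions(k: int = 20) -> List[int]:
--     ans = []
--     i = 0
--     while len(ans) < k:
--         ans.append(6 * i + 1)
--         if len(ans) < k:
--             ans.append(6 * i + 5)
--         i += 1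
--     return ans
-- ===== Notes on version B (the rewrite author's own statement) =====
-- stated objective: faster
-- what changed: B produces each solution directly by a closed-form formula per block index (interleaving the two residues), instead of scanning every successive integer and testing its remainder.
import Mathlib
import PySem

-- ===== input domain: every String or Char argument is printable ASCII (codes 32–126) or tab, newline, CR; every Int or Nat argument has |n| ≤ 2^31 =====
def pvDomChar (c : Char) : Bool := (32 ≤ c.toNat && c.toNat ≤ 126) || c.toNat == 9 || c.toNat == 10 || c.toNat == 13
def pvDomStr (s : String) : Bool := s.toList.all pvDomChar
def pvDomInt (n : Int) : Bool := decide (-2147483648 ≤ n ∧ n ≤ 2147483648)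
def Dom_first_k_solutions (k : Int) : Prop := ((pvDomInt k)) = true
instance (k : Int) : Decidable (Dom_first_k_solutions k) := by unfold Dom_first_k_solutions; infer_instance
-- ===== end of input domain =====

-- B generates the solutions directly by the closed form 6*i+1 / 6*i+5 per block index i,
-- instead of scanning every integer and testing x % 6 (same return value; no mutation observable).

-- ===== PORT A =====
-- A's `while len(ans) < k` loop; the fuel argument only makes the same computation total
-- (6*k.toNat + 6 steps always suffice, proved below).
def pvALoop (fuel : Nat) (ans : List Int) (x : Int) (k : Int) : List Int :=
  match fuel with
  | 0 => ans
  | f + 1 =>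
    if (ans.length : Int) < k then
      pvALoop f (if PySem.Int.mod x 6 == 1 || PySem.Int.mod x 6 == 5 then ans ++ [x] else ans)
        (x + 1) k
    else ans

def first_k_solutions (k : Int) : List Int := pvALoop (6 * k.toNat + 6) [] 1 k

-- ===== PORT B =====
-- B's loop, as structural recursion on the number of elements still to produce
-- (n = k - len(ans)); each round emits 6*i+1 and, if one more is still needed, 6*i+5.
def pvBLoop : Nat → Int → List Int
  | 0, _ => []
  | 1, i => [6 * i + 1]
  | n + 2, i => (6 * i + 1) :: (6 * i + 5) :: pvBLoop n (i + 1)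

def first_k_solutions_alt (k : Int) : List Int := pvBLoop k.toNat 0

-- ===== PRECONDITION & SPEC =====
def Spec_first_k_solutions (k : Int) (out : List Int) : Prop := out = first_k_solutions_alt k
instance (k : Int) (out : List Int) : Decidable (Spec_first_k_solutions k out) := by unfold Spec_first_k_solutions; infer_instance

-- ===== CLAIM (what is proved, stated in full; the proofs are below) =====
def Claim_equal_first_k_solutions : Prop := ∀ (k : Int), Dom_first_k_solutions k → Spec_first_k_solutions k (first_k_solutions k)

-- ===== LEMMAS AND PROOFS =====

theorem pvMod6 (x i r : Int) (h : x = 6 * i + r) (h0 : 0 ≤ r) (h6 : r < 6) :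
    PySem.Int.mod x 6 = r := by
  rw [PySem.Int.mod_eq_emod_of_pos (by norm_num)]
  omega

theorem pvALoop_step (f : Nat) (ans : List Int) (x k : Int) (h : (ans.length : Int) < k) :
    pvALoop (f + 1) ans x k =
      pvALoop f (if PySem.Int.mod x 6 == 1 || PySem.Int.mod x 6 == 5 then ans ++ [x] else ans)
        (x + 1) k := by
  simp [pvALoop, h]

theorem pvALoop_stop (f : Nat) (ans : List Int) (x k : Int) (h : ¬ (ans.length : Int) < k) :
    pvALoop (f + 1) ans x k = ans := by
  simp [pvALoop, h]

theorem pvLoop_eq : ∀ (n : Nat) (i k : Int) (ans : List Int) (fuel : Nat),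
    (ans.length : Int) + n = k → 3 * n + 1 ≤ fuel →
    pvALoop fuel ans (6 * i + 1) k = ans ++ pvBLoop n i := by
  intro n
  induction n using Nat.strong_induction_on with
  | _ n IH =>
    intro i k ans fuel hk hf
    match n with
    | 0 =>
      obtain ⟨f, rfl⟩ : ∃ f, fuel = f + 1 := ⟨fuel - 1, by omega⟩
      rw [pvALoop_stop _ _ _ _ (by omega)]
      simp [pvBLoop]
    | 1 =>
      obtain ⟨f, rfl⟩ : ∃ f, fuel = f + 1 + 1 := ⟨fuel - 2, by omega⟩
      rw [pvALoop_step _ _ _ _ (by omega)]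
      rw [pvMod6 (6 * i + 1) i 1 rfl (by omega) (by omega)]
      simp only [show ((1:Int) == 1 || (1:Int) == 5) = true by decide, if_pos]
      rw [pvALoop_stop _ _ _ _ (by simp; omega)]
      simp [pvBLoop]
    | n + 2 =>
      obtain ⟨f, rfl⟩ : ∃ f, fuel = f + 1 + 1 + 1 + 1 + 1 + 1 := ⟨fuel - 6, by omega⟩
      rw [pvALoop_step _ _ _ _ (by omega)]
      rw [pvMod6 (6 * i + 1) i 1 rfl (by omega) (by omega)]
      simp only [show ((1:Int) == 1 || (1:Int) == 5) = true by decide, if_pos]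
      rw [pvALoop_step _ _ _ _ (by simp; omega)]
      rw [pvMod6 (6 * i + 1 + 1) i 2 (by ring) (by omega) (by omega)]
      simp only [show ((2:Int) == 1 || (2:Int) == 5) = false by decide, Bool.false_eq_true,
        if_false]
      rw [pvALoop_step _ _ _ _ (by simp; omega)]
      rw [pvMod6 (6 * i + 1 + 1 + 1) i 3 (by ring) (by omega) (by omega)]
      simp only [show ((3:Int) == 1 || (3:Int) == 5) = false by decide, Bool.false_eq_true,
        if_false]
      rw [pvALoop_step _ _ _ _ (by simp; omega)]
      rw [pvMod6 (6 * i + 1 + 1 + 1 + 1) i 4 (by ring) (by omega) (by omega)]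
      simp only [show ((4:Int) == 1 || (4:Int) == 5) = false by decide, Bool.false_eq_true,
        if_false]
      rw [pvALoop_step _ _ _ _ (by simp; omega)]
      rw [pvMod6 (6 * i + 1 + 1 + 1 + 1 + 1) i 5 (by ring) (by omega) (by omega)]
      simp only [show ((5:Int) == 1 || (5:Int) == 5) = true by decide, if_pos]
      by_cases hn : n = 0
      · subst hn
        rw [pvALoop_stop _ _ _ _ (by simp; omega)]
        rw [show (6 * i + 1 + 1 + 1 + 1 + 1 : Int) = 6 * i + 5 by ring]
        simp [pvBLoop]
      · rw [pvALoop_step _ _ _ _ (by simp; omega)]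
        rw [pvMod6 (6 * i + 1 + 1 + 1 + 1 + 1 + 1) (i + 1) 0 (by ring) (by omega) (by omega)]
        simp only [show ((0:Int) == 1 || (0:Int) == 5) = false by decide, Bool.false_eq_true,
          if_false]
        rw [show 6 * i + 1 + 1 + 1 + 1 + 1 + 1 + 1 = 6 * (i + 1) + 1 by ring]
        rw [IH n (by omega) (i + 1) k _ f (by simp; omega) (by omega)]
        rw [show (6 * i + 1 + 1 + 1 + 1 + 1 : Int) = 6 * i + 5 by ring]
        simp [pvBLoop]

-- ===== VERDICT (by name: the statement is the Claim_ definition above) =====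
theorem first_k_solutions_spec : Claim_equal_first_k_solutions := by
  intro k _
  unfold Spec_first_k_solutions first_k_solutions first_k_solutions_alt
  by_cases hk : 0 < k
  · have h1 : (6 : Int) * 0 + 1 = 1 := by ring
    rw [← h1, pvLoop_eq k.toNat 0 k [] (6 * k.toNat + 6) (by simp; omega) (by omega)]
    simp
  · have hz : k.toNat = 0 := by omega
    rw [hz]
    rw [show 6 * (0:Nat) + 6 = 5 + 1 by norm_num]
    rw [pvALoop_stop _ _ _ _ (by simp; omega)]
    simp [pvBLoop]
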